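-- pv_equiv track=rewrite | github.com/rahalyy/project-py | Untitled-1.py | analyze_sentence
-- ===== SOURCE A (Python) =====
-- def analyze_sentence(sentence):
--
--     length = 0
--     word_count = 0
--     vowel_count = 0
--
--     vowels = "aeiou"
--     inside_word = False
--
--
--     for char in sentence:
--         if char == '.':
--             break
--         length += 1
--
--         if char in vowels:
--             vowel_count += 1
--
--         if char == ' ' and inside_word:
--             word_count += 1
--             inside_word = False
--
--         if char != ' ':
--             inside_word = True
--
--     if inside_word:
--         word_count += 1
--
--     return length, word_count, vowel_count
-- ===== SOURCE B (Python) =====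
-- def analyze_sentence(sentence):
--     prefix = sentence.partition('.')[0]
--     length = len(prefix)
--     vowel_count = sum(1 for c in prefix if c in "aeiou")
--     word_count = sum(1 for prev, c in zip(' ' + prefix, prefix)
--                      if prev == ' ' and c != ' ')
--     return length, word_count, vowel_count
-- ===== Notes on version B (the rewrite author's own statement) =====
-- stated objective: simpler
-- what changed: Replaces the single fused loop with an inside_word flag and break by taking the prefix before the first period and computing length, vowel count and word count (word starts via a zip with the shifted string) as three independent aggregations.
import Mathlib
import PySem

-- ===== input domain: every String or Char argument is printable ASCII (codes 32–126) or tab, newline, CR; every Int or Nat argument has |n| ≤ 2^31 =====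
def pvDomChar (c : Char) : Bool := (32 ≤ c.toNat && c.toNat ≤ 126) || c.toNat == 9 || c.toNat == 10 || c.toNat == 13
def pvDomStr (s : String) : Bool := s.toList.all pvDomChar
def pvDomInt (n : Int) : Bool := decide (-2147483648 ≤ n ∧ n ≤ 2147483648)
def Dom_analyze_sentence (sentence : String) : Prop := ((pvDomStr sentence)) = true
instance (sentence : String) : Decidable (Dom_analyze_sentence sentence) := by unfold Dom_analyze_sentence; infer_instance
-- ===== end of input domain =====

-- B replaces A's fused stateful loop (inside_word flag, break at '.') by the prefix before the
-- first '.' and three independent aggregations over it (objective: simpler).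

-- ===== PORT A =====
-- the for-loop with its four accumulators; the base cases carry the trailing 'if inside_word' fix-up
def analyzeLoop (cs : List Char) (length wc vc : Int) (inside : Bool) : Int × Int × Int :=
  match cs with
  | [] => (length, if inside then wc + 1 else wc, vc)
  | c :: rest =>
    if c = '.' then (length, if inside then wc + 1 else wc, vc)
    else
      let vc' := if "aeiou".toList.contains c then vc + 1 else vc
      let wc' := if c == ' ' && inside then wc + 1 else wc
      let inside₁ := if c == ' ' && inside then false else inside
      let inside' := if c ≠ ' ' then true else inside₁
      analyzeLoop rest (length + 1) wc' vc' inside'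

def analyze_sentence (sentence : String) : Int × Int × Int :=
  analyzeLoop sentence.toList 0 0 0 false

-- ===== PORT B =====
def analyze_sentence_alt (sentence : String) : Int × Int × Int :=
  let pre := sentence.toList.takeWhile (fun c => c ≠ '.')
  let length : Int := pre.length
  let vowel : Int := (pre.countP (fun c => "aeiou".toList.contains c) : Int)
  let word : Int := (((' ' :: pre).zip pre).countP (fun p => p.1 == ' ' && p.2 ≠ ' ') : Int)
  (length, word, vowel)

-- ===== PRECONDITION & SPEC =====
def Spec_analyze_sentence (sentence : String) (out : Int × Int × Int) : Prop := out = analyze_sentence_alt sentence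
instance (sentence : String) (out : Int × Int × Int) : Decidable (Spec_analyze_sentence sentence out) := by unfold Spec_analyze_sentence; infer_instance

-- ===== CLAIM (what is proved, stated in full; the proofs are below) =====
def Claim_equal_analyze_sentence : Prop := ∀ (sentence : String), Dom_analyze_sentence sentence → Spec_analyze_sentence sentence (analyze_sentence sentence)

-- ===== LEMMAS AND PROOFS =====

-- number of word starts in cs when the previous character was (non-)space according to 'inside'
def wstarts (inside : Bool) (cs : List Char) : Int :=
  match cs with
  | [] => 0
  | c :: rest => (if !inside && c ≠ ' ' then 1 else 0) + wstarts (c != ' ') rest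

theorem wstarts_eq_zip : ∀ (pre : List Char) (prev : Char),
    wstarts (prev != ' ') pre
      = (((prev :: pre).zip pre).countP (fun p => p.1 == ' ' && p.2 ≠ ' ') : Int) := by
  intro pre
  induction pre with
  | nil => intro prev; simp [wstarts]
  | cons c rest ih =>
    intro prev
    have h := ih c
    simp only [wstarts, List.zip_cons_cons, List.countP_cons, h]
    by_cases hp : prev = ' ' <;> by_cases hc : c = ' ' <;> simp [hp, hc] <;> omega

theorem analyzeLoop_eq : ∀ (cs : List Char) (l w v : Int) (inside : Bool),
    analyzeLoop cs l w v inside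
      = (l + ((cs.takeWhile (fun c => c ≠ '.')).length : Int),
         w + wstarts inside (cs.takeWhile (fun c => c ≠ '.')) + (if inside then 1 else 0),
         v + ((cs.takeWhile (fun c => c ≠ '.')).countP (fun c => "aeiou".toList.contains c) : Int)) := by
  intro cs
  induction cs with
  | nil => intro l w v inside; simp [analyzeLoop, wstarts]; cases inside <;> simp
  | cons c rest ih =>
    intro l w v inside
    by_cases hdot : c = '.'
    · simp [analyzeLoop, hdot, wstarts]; cases inside <;> simp
    · have hpre : (c :: rest).takeWhile (fun c => decide (c ≠ '.')) = c :: rest.takeWhile (fun c => decide (c ≠ '.')) := by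
        simp [hdot]
      simp only [analyzeLoop, hdot, if_false, hpre, ih, wstarts, List.countP_cons, Prod.mk.injEq]
      refine ⟨by push_cast [List.length_cons]; ring, ?_, ?_⟩
      · by_cases hsp : c = ' '
        · have hb : (c != ' ') = false := by simp [hsp]
          cases inside <;> simp [hsp, hb] <;> omega
        · have hb : (c != ' ') = true := by simp [hsp]
          cases inside <;> simp [hsp, hb] <;> omega
      · split_ifs <;> push_cast <;> ring

-- ===== VERDICT (by name: the statement is the Claim_ definition above) =====
theorem analyze_sentence_spec : Claim_equal_analyze_sentence := by
  intro s _
  unfold Spec_analyze_sentence analyze_sentence analyze_sentence_alt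
  rw [analyzeLoop_eq]
  have hw := wstarts_eq_zip (s.toList.takeWhile (fun c => c ≠ '.')) ' '
  simp at hw ⊢
  exact hw
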